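-- pv_equiv track=rewrite | github.com/jimhorng/algorithm | basic_calculator_variable/solution2.py | _collect_flip_deltas
-- ===== SOURCE A (Python) =====
-- def _collect_flip_deltas(chars: list[str]) -> list[int]:
--     flip_deltas = [0] * (len(chars) + 1)
--     parentheses_stack: list[tuple[int, bool]] = []
--
--     for index, ch in enumerate(chars):
--         if ch == "(":
--             should_flip_inside = index > 0 and chars[index - 1] == "-"
--             parentheses_stack.append((index, should_flip_inside))
--             continue
--
--         if ch == ")":
--             left_index, should_flip_inside = parentheses_stack.pop()
--             if should_flip_inside:
--                 flip_deltas[left_index + 1] += 1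
--                 flip_deltas[index] -= 1
--
--     return flip_deltas
-- ===== SOURCE B (Python) =====
-- def _collect_flip_deltas(chars: list[str]) -> list[int]:
--     # Recursive-descent parser: scan(i) walks one nesting level starting at
--     # index i and recurses into each "(...)" group; a group's two deltas are
--     # written when its closing index comes back from the recursive call.
--     # There is no stack data structure at all.
--     n = len(chars)
--     flip_deltas = [0] * (n + 1)
--
--     def scan(i: int) -> int:
--         # Consume tokens of the current level; return the index of the ')'
--         # that ends the enclosing group, or n when the input runs out.
--         while i < n:
--             ch = chars[i]
--             if ch == ")":
--                 return i
--             if ch == "(":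
--                 close = scan(i + 1)
--                 if close < n and i > 0 and chars[i - 1] == "-":
--                     flip_deltas[i + 1] += 1
--                     flip_deltas[close] -= 1
--                 i = close + 1
--             else:
--                 i += 1
--         return n
--
--     scan(0)
--     return flip_deltas
-- ===== Notes on version B (the rewrite author's own statement) =====
-- stated objective: alternative
-- what changed: A's explicit stack of (index, flag) pairs is replaced by a recursive-descent parser: scan(i) walks one nesting level with a plain index cursor and recurses into each '(' group, writing the group's two deltas when the recursive call returns the closing index; no stack data structure exists.
import Mathlib
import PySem

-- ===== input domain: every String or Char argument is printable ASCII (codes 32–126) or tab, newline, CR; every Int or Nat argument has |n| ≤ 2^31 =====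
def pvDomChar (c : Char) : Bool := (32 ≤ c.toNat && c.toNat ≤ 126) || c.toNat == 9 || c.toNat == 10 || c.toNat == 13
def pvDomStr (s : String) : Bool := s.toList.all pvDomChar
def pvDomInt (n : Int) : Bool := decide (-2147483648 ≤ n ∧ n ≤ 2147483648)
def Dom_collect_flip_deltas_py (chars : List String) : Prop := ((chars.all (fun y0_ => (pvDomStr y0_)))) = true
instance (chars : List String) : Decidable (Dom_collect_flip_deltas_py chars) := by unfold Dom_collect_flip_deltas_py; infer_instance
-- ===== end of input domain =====

-- B replaces A's explicit stack of (index, flag) pairs by a recursive-descent parser: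
-- scan(i) walks one nesting level and recurses into each "(...)" group, writing the
-- group's two deltas when the recursive call returns the closing index (alternative
-- decomposition, same cost).  Equivalence is about the return value only.

-- ===== PORT A =====
-- loop body of A; `chars[index-1]` is accessed only with 0 < index, so pyGetD is exact;
-- the list indices l+1 and index are nonnegative and in range, so `.toNat` + List.modify is exact.
def pvStepA (chars : List String) (st : List Int × List (Int × Bool)) (p : Int × String) :
    List Int × List (Int × Bool) :=
  if p.2 = "(" then
    (st.1, (p.1, decide (0 < p.1 ∧ PySem.List.pyGetD chars (p.1 - 1) "" = "-")) :: st.2)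
  else if p.2 = ")" then
    match st.2 with
    | [] => st  -- Python's pop() raises IndexError here; such inputs are outside Pre_
    | (l, f) :: rest =>
        (if f then ((st.1.modify (l + 1).toNat (· + 1)).modify p.1.toNat (· - 1)) else st.1,
         rest)
  else st

def collect_flip_deltas_py (chars : List String) : List Int :=
  ((PySem.List.enumerate chars).foldl (pvStepA chars)
    (List.replicate (chars.length + 1) 0, [])).1

-- ===== PORT B =====
-- Source B's scan: the while loop is the tail calls at i+1 / close+1, the '(' branch the
-- recursive call; fuel only makes the recursion total (pvScanB_isSome below: length+2
-- always suffices, as every call strictly increases the index).  chars[i] under the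
-- i < n guard and chars[i-1] under 0 < i are exact as List.getD.
def pvScanB (chars : List String) : Nat → List Int → Nat → Option (List Int × Nat)
  | 0, _, _ => none
  | fuel+1, d, i =>
    if i < chars.length then
      if chars.getD i "" = ")" then some (d, i)
      else if chars.getD i "" = "(" then
        match pvScanB chars fuel d (i+1) with
        | none => none
        | some (d1, c) =>
          pvScanB chars fuel
            (if c < chars.length ∧ 0 < i ∧ chars.getD (i-1) "" = "-" then
               (d1.modify (i+1) (· + 1)).modify c (· - 1)
             else d1)
            (c+1)
      else pvScanB chars fuel d (i+1)
    else some (d, chars.length)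

def collect_flip_deltas_py_alt (chars : List String) : List Int :=
  match pvScanB chars (chars.length + 2) (List.replicate (chars.length + 1) 0) 0 with
  | some (d, _) => d
  | none => List.replicate (chars.length + 1) 0  -- unreachable: fuel length+2 suffices (pvScanB_isSome)

-- ===== PRECONDITION & SPEC =====
-- Pre_ excludes exactly the inputs with an unmatched ")" (some prefix has more ")" than "("),
-- on which the Python A raises IndexError (pop from an empty stack).
def Pre_collect_flip_deltas_py (chars : List String) : Prop :=
  ∀ n ∈ List.range (chars.length + 1),
    (chars.take n).count ")" ≤ (chars.take n).count "("
instance (chars : List String) : Decidable (Pre_collect_flip_deltas_py chars) := by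
  unfold Pre_collect_flip_deltas_py; infer_instance

def pvWitness_collect_flip_deltas_py : List String := ["-", "(", "x", ")"]

def Spec_collect_flip_deltas_py (chars : List String) (out : List Int) : Prop := out = collect_flip_deltas_py_alt chars
instance (chars : List String) (out : List Int) : Decidable (Spec_collect_flip_deltas_py chars out) := by unfold Spec_collect_flip_deltas_py; infer_instance

-- ===== CLAIM (what is proved, stated in full; the proofs are below) =====
def Claim_equal_collect_flip_deltas_py : Prop := ∀ (chars : List String), Dom_collect_flip_deltas_py chars → Pre_collect_flip_deltas_py chars → Spec_collect_flip_deltas_py chars (collect_flip_deltas_py chars)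

-- ===== LEMMAS AND PROOFS =====

-- scan past the end returns (d, length)
lemma pvScanB_past (chars : List String) (fuel : Nat) (d d' : List Int) (i j : Nat)
    (h : pvScanB chars fuel d i = some (d', j)) (hi : chars.length ≤ i) :
    d' = d ∧ j = chars.length := by
  cases fuel with
  | zero => simp [pvScanB] at h
  | succ fuel =>
    unfold pvScanB at h
    rw [if_neg (Nat.not_lt.mpr hi)] at h
    simp only [Option.some.injEq, Prod.mk.injEq] at h
    exact ⟨h.1.symm, h.2.symm⟩

-- the returned index never decreases and never exceeds the length
lemma pvScanB_bounds (chars : List String) :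
    ∀ fuel d i d' j, pvScanB chars fuel d i = some (d', j) → i ≤ chars.length →
      i ≤ j ∧ j ≤ chars.length := by
  intro fuel
  induction fuel with
  | zero => intro d i d' j h _; simp [pvScanB] at h
  | succ fuel ih =>
    intro d i d' j h hi
    by_cases hlt : i < chars.length
    · unfold pvScanB at h
      rw [if_pos hlt] at h
      by_cases hcl : chars.getD i "" = ")"
      · rw [if_pos hcl] at h
        simp only [Option.some.injEq, Prod.mk.injEq] at h
        omega
      · rw [if_neg hcl] at h
        by_cases hop : chars.getD i "" = "("
        · rw [if_pos hop] at h
          cases hinner : pvScanB chars fuel d (i+1) with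
          | none => rw [hinner] at h; simp at h
          | some p =>
            obtain ⟨d1, c⟩ := p
            rw [hinner] at h
            dsimp only at h
            have hb1 := ih d (i+1) d1 c hinner hlt
            by_cases hc : c + 1 ≤ chars.length
            · have hb2 := ih _ (c+1) d' j h hc
              omega
            · have := pvScanB_past chars fuel _ d' (c+1) j h (by omega)
              omega
        · rw [if_neg hop] at h
          have := ih d (i+1) d' j h hlt
          omega
    · have := pvScanB_past chars (fuel+1) d d' i j h (by omega)
      omega

-- fuel length+2 suffices: every call strictly increases the index
lemma pvScanB_isSome (chars : List String) :
    ∀ fuel d i, chars.length + 2 ≤ fuel + i → i ≤ chars.length + 1 →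
      (pvScanB chars fuel d i).isSome := by
  intro fuel
  induction fuel with
  | zero => intro d i h1 h2; omega
  | succ fuel ih =>
    intro d i h1 h2
    by_cases hlt : i < chars.length
    · unfold pvScanB
      rw [if_pos hlt]
      by_cases hcl : chars.getD i "" = ")"
      · rw [if_pos hcl]; rfl
      · rw [if_neg hcl]
        by_cases hop : chars.getD i "" = "("
        · rw [if_pos hop]
          have h3 := ih d (i+1) (by omega) (by omega)
          cases hinner : pvScanB chars fuel d (i+1) with
          | none => rw [hinner] at h3; simp at h3
          | some p =>
            obtain ⟨d1, c⟩ := p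
            have hb := pvScanB_bounds chars fuel d (i+1) d1 c hinner hlt
            dsimp only
            exact ih _ (c+1) (by omega) (by omega)
        · rw [if_neg hop]
          exact ih d (i+1) (by omega) (by omega)
    · unfold pvScanB
      rw [if_neg hlt]
      rfl

-- the suffix of enumerate starting at i, exposed as a cons
lemma pv_drop_enum (chars : List String) (i : Nat) (h : i < chars.length) :
    (PySem.List.enumerate chars).drop i
      = ((i : Int), chars[i]) :: (PySem.List.enumerate chars).drop (i+1) := by
  have hl : i < (PySem.List.enumerate chars).length := by
    rw [PySem.List.length_enumerate]; exact h
  rw [List.drop_eq_getElem_cons hl, PySem.List.getElem_enumerate]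
  simp

-- counts of the one-longer prefix
lemma pv_count_take_succ (chars : List String) (i : Nat) (h : i < chars.length) (s : String) :
    (chars.take (i+1)).count s = (chars.take i).count s + (if chars[i] = s then 1 else 0) := by
  rw [List.take_add_one, List.getElem?_eq_getElem h]
  simp only [Option.toList_some, List.count_append, List.count_cons, List.count_nil,
    beq_iff_eq]
  split_ifs <;> omega

-- Main correspondence: a successful scan from i describes A's fold over the suffix from i.
-- If scan stops at the end (j = length) it yields the final deltas of the whole remaining
-- fold, for ANY surrounding stack; if it stops at a stray ')' (j < length) the fold reaches
-- entry j with deltas d' and the stack untouched, and the region [i, j) is balanced.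
lemma pv_scan_fold (chars : List String) :
    ∀ fuel d i d' j, pvScanB chars fuel d i = some (d', j) → i ≤ chars.length →
      ( (j = chars.length ∧ ∀ stk : List (Int × Bool),
          (((PySem.List.enumerate chars).drop i).foldl (pvStepA chars) (d, stk)).1 = d')
      ∨ (j < chars.length ∧ chars.getD j "" = ")" ∧
          (chars.take i).count "(" + (chars.take j).count ")"
            = (chars.take i).count ")" + (chars.take j).count "(" ∧
          ∀ stk : List (Int × Bool),
            ((PySem.List.enumerate chars).drop i).foldl (pvStepA chars) (d, stk)
              = ((PySem.List.enumerate chars).drop j).foldl (pvStepA chars) (d', stk)) ) := by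
  intro fuel
  induction fuel with
  | zero => intro d i d' j h _; simp [pvScanB] at h
  | succ fuel ih =>
    intro d i d' j h hi
    by_cases hlt : i < chars.length
    · have hgd : chars.getD i "" = chars[i] := List.getD_eq_getElem chars "" hlt
      unfold pvScanB at h
      rw [if_pos hlt] at h
      by_cases hcl : chars.getD i "" = ")"
      · -- stray ')': scan returns (d, i)
        rw [if_pos hcl] at h
        simp only [Option.some.injEq, Prod.mk.injEq] at h
        obtain ⟨rfl, rfl⟩ := h
        exact Or.inr ⟨hlt, hcl, by omega, fun stk => rfl⟩
      · rw [if_neg hcl] at h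
        by_cases hop : chars.getD i "" = "("
        · -- '(' : recurse, write the deltas, continue after the close
          rw [if_pos hop] at h
          cases hinner : pvScanB chars fuel d (i+1) with
          | none => rw [hinner] at h; simp at h
          | some p =>
            obtain ⟨d1, c⟩ := p
            rw [hinner] at h
            dsimp only at h
            have hci : chars[i] = "(" := by rw [← hgd]; exact hop
            -- the flag A pushes at index i equals B's condition
            have hflag : decide (0 < ((i:Int)) ∧ PySem.List.pyGetD chars ((i:Int) - 1) "" = "-")
                = decide (0 < i ∧ chars.getD (i-1) "" = "-") := by
              by_cases hz : 0 < i
              · have hcast : ((i:Int)) - 1 = ((i - 1 : Nat) : Int) := by omega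
                rw [hcast, PySem.List.pyGetD_natCast]
                simp [hz]
              · have hz' : i = 0 := by omega
                subst hz'; simp
            -- one fold step at entry i: push the flag
            have hstep : ∀ stk : List (Int × Bool),
                ((PySem.List.enumerate chars).drop i).foldl (pvStepA chars) (d, stk)
                  = ((PySem.List.enumerate chars).drop (i+1)).foldl (pvStepA chars)
                      (d, ((i:Int), decide (0 < i ∧ chars.getD (i-1) "" = "-")) :: stk) := by
              intro stk
              rw [pv_drop_enum chars i hlt, List.foldl_cons, hci]
              have hpush : pvStepA chars (d, stk) ((i:Int), "(")
                  = (d, ((i:Int), decide (0 < i ∧ chars.getD (i-1) "" = "-")) :: stk) := by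
                simp only [pvStepA, hflag, if_true]
              rw [hpush]
            rcases ih d (i+1) d1 c hinner hlt with ⟨hc, hfold1⟩ | ⟨hc, hclc, hbal1, hfold1⟩
            · -- inner region ran to the end: the '(' at i is unmatched, no deltas written
              subst hc
              rw [if_neg (fun hx => absurd hx.1 (Nat.lt_irrefl _))] at h
              obtain ⟨rfl, rfl⟩ := pvScanB_past chars fuel d1 d' (chars.length+1) j h (by omega)
              refine Or.inl ⟨rfl, fun stk => ?_⟩
              rw [hstep stk]
              exact hfold1 _
            · -- inner region balanced, closed by the ')' at c
              have hcget : chars[c] = ")" := by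
                rw [← List.getD_eq_getElem chars "" hc]; exact hclc
              have e1 : ((i:Int) + 1).toNat = i + 1 := by omega
              have e2 : ((c:Int)).toNat = c := by omega
              -- fold step at entry c: pop the flag, write the two deltas iff the flag
              have hpop : ∀ stk : List (Int × Bool),
                  pvStepA chars
                      (d1, ((i:Int), decide (0 < i ∧ chars.getD (i-1) "" = "-")) :: stk)
                      ((c:Int), ")")
                    = ((if c < chars.length ∧ 0 < i ∧ chars.getD (i-1) "" = "-" then
                          (d1.modify (i+1) (· + 1)).modify c (· - 1) else d1), stk) := by
                intro stk
                by_cases hP : 0 < i ∧ chars.getD (i-1) "" = "-"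
                · simp [pvStepA, hP, hc, e1, e2]
                · have hP' : ¬(0 < i ∧ chars[i - 1]?.getD "" = "-") := by simpa using hP
                  simp [pvStepA, hP']
              have hstep2 : ∀ stk : List (Int × Bool),
                  ((PySem.List.enumerate chars).drop c).foldl (pvStepA chars)
                      (d1, ((i:Int), decide (0 < i ∧ chars.getD (i-1) "" = "-")) :: stk)
                    = ((PySem.List.enumerate chars).drop (c+1)).foldl (pvStepA chars)
                        ((if c < chars.length ∧ 0 < i ∧ chars.getD (i-1) "" = "-" then
                            (d1.modify (i+1) (· + 1)).modify c (· - 1) else d1), stk) := by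
                intro stk
                rw [pv_drop_enum chars c hc, List.foldl_cons, hcget, hpop]
              have hall : ∀ stk : List (Int × Bool),
                  ((PySem.List.enumerate chars).drop i).foldl (pvStepA chars) (d, stk)
                    = ((PySem.List.enumerate chars).drop (c+1)).foldl (pvStepA chars)
                        ((if c < chars.length ∧ 0 < i ∧ chars.getD (i-1) "" = "-" then
                            (d1.modify (i+1) (· + 1)).modify c (· - 1) else d1), stk) := by
                intro stk
                rw [hstep stk, hfold1 _, hstep2 stk]
              -- counts across the whole group
              have hci' : (chars.take (i+1)).count "(" = (chars.take i).count "(" + 1 := by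
                rw [pv_count_take_succ chars i hlt "(", if_pos hci]
              have hci'' : (chars.take (i+1)).count ")" = (chars.take i).count ")" := by
                rw [pv_count_take_succ chars i hlt ")", if_neg (by rw [hci]; decide)]; omega
              have hcc' : (chars.take (c+1)).count ")" = (chars.take c).count ")" + 1 := by
                rw [pv_count_take_succ chars c hc ")", if_pos hcget]
              have hcc'' : (chars.take (c+1)).count "(" = (chars.take c).count "(" := by
                rw [pv_count_take_succ chars c hc "(", if_neg (by rw [hcget]; decide)]; omega
              rcases ih _ (c+1) d' j h (by omega) with ⟨hj, hfold2⟩ | ⟨hj, hjc, hbal2, hfold2⟩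
              · refine Or.inl ⟨hj, fun stk => ?_⟩
                rw [hall stk]
                exact hfold2 stk
              · refine Or.inr ⟨hj, hjc, by omega, fun stk => ?_⟩
                rw [hall stk]
                exact hfold2 stk
        · -- ordinary character: state unchanged
          rw [if_neg hop] at h
          have h1 : ¬ chars[i] = "(" := by rw [← hgd]; exact hop
          have h2 : ¬ chars[i] = ")" := by rw [← hgd]; exact hcl
          have hstep : ∀ stk : List (Int × Bool),
              ((PySem.List.enumerate chars).drop i).foldl (pvStepA chars) (d, stk)
                = ((PySem.List.enumerate chars).drop (i+1)).foldl (pvStepA chars) (d, stk) := by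
            intro stk
            rw [pv_drop_enum chars i hlt, List.foldl_cons]
            have : pvStepA chars (d, stk) ((i:Int), chars[i]) = (d, stk) := by
              simp only [pvStepA]
              rw [if_neg h1, if_neg h2]
            rw [this]
          have hcnt1 : (chars.take (i+1)).count "(" = (chars.take i).count "(" := by
            rw [pv_count_take_succ chars i hlt "(", if_neg h1]; omega
          have hcnt2 : (chars.take (i+1)).count ")" = (chars.take i).count ")" := by
            rw [pv_count_take_succ chars i hlt ")", if_neg h2]; omega
          rcases ih d (i+1) d' j h hlt with ⟨hj, hfold⟩ | ⟨hj, hjc, hbal, hfold⟩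
          · exact Or.inl ⟨hj, fun stk => by rw [hstep stk]; exact hfold stk⟩
          · refine Or.inr ⟨hj, hjc, by omega, fun stk => by rw [hstep stk]; exact hfold stk⟩
    · obtain ⟨rfl, rfl⟩ := pvScanB_past chars (fuel+1) d d' i j h (by omega)
      have hdrop : (PySem.List.enumerate chars).drop i = [] := by
        apply List.drop_eq_nil_of_le
        rw [PySem.List.length_enumerate]; omega
      exact Or.inl ⟨rfl, fun stk => by rw [hdrop]; rfl⟩

-- ===== VERDICT (by name: the statement is the Claim_ definition above) =====
theorem collect_flip_deltas_py_spec : Claim_equal_collect_flip_deltas_py := by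
  intro chars _ hpre
  unfold Spec_collect_flip_deltas_py collect_flip_deltas_py collect_flip_deltas_py_alt
  have hs := pvScanB_isSome chars (chars.length + 2)
    (List.replicate (chars.length + 1) 0) 0 (by omega) (by omega)
  cases hsc : pvScanB chars (chars.length + 2) (List.replicate (chars.length + 1) 0) 0 with
  | none => rw [hsc] at hs; simp at hs
  | some p =>
    obtain ⟨d', j⟩ := p
    dsimp only
    rcases pv_scan_fold chars (chars.length + 2) _ 0 d' j hsc (by omega) with
      ⟨hj, hfold⟩ | ⟨hj, hjc, hbal, -⟩
    · have := hfold []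
      rw [List.drop_zero] at this
      exact this
    · -- a stray ')' at j contradicts Pre_
      exfalso
      have hget : chars[j] = ")" := by rw [← List.getD_eq_getElem chars "" hj]; exact hjc
      have h1 : (chars.take (j+1)).count ")" = (chars.take j).count ")" + 1 := by
        rw [pv_count_take_succ chars j hj ")", if_pos hget]
      have h2 : (chars.take (j+1)).count "(" = (chars.take j).count "(" := by
        rw [pv_count_take_succ chars j hj "(", if_neg (by rw [hget]; decide)]; omega
      have hp := hpre (j+1) (by rw [List.mem_range]; omega)
      simp only [List.take_zero, List.count_nil] at hbal
      omega
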